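-- pv_equiv track=rewrite | github.com/AlejandroSanchezCano/Advent-of-Code-2023 | Scripts/day7.py | hash_hand2
-- ===== SOURCE A (Python) =====
-- from collections import Counter
--
-- def hash_hand2(hand: str) -> str:
--     '''
--     Hashes the playing hand to an alphabetic code that eases the process of
--     sorting using the 'key' argument of the sorting functions/methods. The
--     hashing method is:
--     - 1 capital letter A-G according to the hand type.
--     - 5 lowercase letters a-m according to the rank of the sequencial cards.
--     This takes into account that J is a joker/placeholder card and has the
--     lowest rank (problem 2)
--
--
--     Parameters
--     ----------
--     hand : str
--         Playing hand -> 'AAKJ4'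
--
--     Returns
--     -------
--     str
--         Hashed hand -> 'Daabmj'
--     '''
--
--     # Count the number of cards in each hand
--     card2count = Counter(hand)
--
--     # Rank hash dictionary
--     cards2rank = {
--         'A': 'a', 'K': 'b', 'Q': 'c', 'J': 'm',
--         'T': 'd', '9': 'e', '8': 'f', '7': 'g',
--         '6': 'h', '5': 'i', '4': 'j', '3': 'k', '2': 'l'
--     }
--
--     # Transform the J card into the most convenient card
--     if 1 <= card2count.get('J', 0) <= 4:
--
--         # J cards will transform into other cards
--         j = card2count.pop('J')
--
--         # If all cards are different, the J cards will morph into the one with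
--         # highest rank in the hand. Otherwise, into the most frequent card
--         if len(card2count.values()) == 5:
--             most_convenient = min(card2count, key=lambda x: cards2rank[x])
--         else:
--             most_convenient = max(card2count, key=card2count.get)
--
--         # Add the amount of J cards to the most convinient card type
--         card2count[most_convenient] += j
--
--     # Edge case -> 'JJJJJ'
--     elif card2count.get('J', 0) == 5:
--         return 'Ammmmm'
--
--     # Sort per values
--     card_counts = sorted(card2count.values())
--
--     # Type hash conditionals
--     if card_counts == [5]:
--         hash = 'A'
--     elif card_counts == [1, 4]:
--         hash = 'B'
--     elif card_counts == [2, 3]: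
--         hash = 'C'
--     elif card_counts == [1, 1, 3]:
--         hash = 'D'
--     elif card_counts == [1, 2, 2]:
--         hash = 'E'
--     elif card_counts == [1, 1, 1, 2]:
--         hash = 'F'
--     else:
--         hash = 'G'
--
--     # Concatenate the two hash parts
--     return hash + ''.join([cards2rank[card] for card in hand])
-- ===== SOURCE B (Python) =====
-- def hash_hand2(hand: str) -> str:
--     # Pair-counting classification: the hand type is read off the number of
--     # equal unordered card pairs (with a closed-form joker adjustment),
--     # no Counter/dict is built at all.
--     cards = "AKQJT98765432"
--     letters = "abcmdefghijkl"
--     suffix = ''.join(letters[cards.index(c)] for c in hand)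
--     j = hand.count('J')
--     if 1 <= j <= 4:
--         rest = [c for c in hand if c != 'J']
--         m = max(rest.count(c) for c in rest)
--         p = sum(rest[i + 1:].count(rest[i]) for i in range(len(rest))) \
--             + j * m + j * (j - 1) // 2
--     else:
--         p = sum(hand[i + 1:].count(hand[i]) for i in range(len(hand)))
--     typ = {10: 'A', 6: 'B', 4: 'C', 3: 'D', 2: 'E', 1: 'F'}.get(p, 'G') \
--         if len(hand) == 5 else 'G'
--     return typ + suffix
-- ===== Notes on version B (the rewrite author's own statement) =====
-- stated objective: alternative
-- what changed: B builds no Counter/dict at all: it classifies the hand type from the number of equal unordered card pairs (a direct scan of the hand, plus the closed-form joker adjustment j*m + j*(j-1)/2), mapping that pair count to the type letter, instead of building a Counter, folding the joker in, sorting the count list and matching it against six literal patterns; the rank suffix is an index into two parallel strings instead of a dict lookup.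
-- intended difference: On hands over the 13-card alphabet containing exactly five 'J' cards plus at least one other card (length > 5), A's early return yields 'Ammmmm', discarding the extra cards and the whole rank suffix; B classifies the hand normally (e.g. 'Gmmmmma' for 'JJJJJA'), which keeps the promised 1 + len(hand) letter format and is what the function intends. — e.g. on hash_hand2("JJJJJA"): A returns "Ammmmm", B returns "Gmmmmma"
-- outside the precondition, e.g. on hash_hand2('JJJJJ!'): A returns 'Ammmmm', B raises ValueError; on hash_hand2('J'): A raises ValueError, B raises ValueError; on hash_hand2('Ammmmm'): A raises KeyError, B raises ValueError
import Mathlib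
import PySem

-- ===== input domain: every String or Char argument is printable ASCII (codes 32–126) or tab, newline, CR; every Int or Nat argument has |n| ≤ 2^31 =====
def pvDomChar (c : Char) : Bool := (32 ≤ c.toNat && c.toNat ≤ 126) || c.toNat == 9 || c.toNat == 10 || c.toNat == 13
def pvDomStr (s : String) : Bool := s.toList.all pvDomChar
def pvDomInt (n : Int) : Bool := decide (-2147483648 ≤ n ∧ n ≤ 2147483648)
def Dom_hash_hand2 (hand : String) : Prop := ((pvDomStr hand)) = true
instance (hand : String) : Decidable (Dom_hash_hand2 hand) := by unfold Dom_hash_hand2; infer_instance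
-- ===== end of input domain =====

-- B builds no counter: it classifies the hand type from the number of equal unordered card
-- pairs (with a closed-form joker adjustment) instead of sorting a Counter's values and
-- matching six literal patterns; A's five-joker early return on over-long hands is an
-- intended difference, see D_ below.

-- ===== PORT A =====

-- cards2rank; a missing key is a Python KeyError, excluded by Pre_ (the port returns '?' there)
def pvRanks : PySem.Dict Char Char := PySem.Dict.ofList
  [('A','a'),('K','b'),('Q','c'),('J','m'),('T','d'),('9','e'),('8','f'),('7','g'),
   ('6','h'),('5','i'),('4','j'),('3','k'),('2','l')]

def pvRankOf (c : Char) : Char := (pvRanks.get? c).getD '?'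

-- A's chain of comparisons of the sorted count list against the six literal patterns
def pvTypeA (card_counts : List Int) : String :=
  if card_counts = [5] then "A"
  else if card_counts = [1, 4] then "B"
  else if card_counts = [2, 3] then "C"
  else if card_counts = [1, 1, 3] then "D"
  else if card_counts = [1, 2, 2] then "E"
  else if card_counts = [1, 1, 1, 2] then "F"
  else "G"

def hash_hand2 (hand : String) : String :=
  let card2count := PySem.Dict.counter hand.toList
  if 1 ≤ card2count.getD 'J' 0 ∧ card2count.getD 'J' 0 ≤ 4 then
    match card2count.pop? 'J' with
    | none => ""          -- unreachable: 'J' is a key of the counter here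
    | some (j, rest) =>
      let most_convenient :=
        if rest.values.length = 5 then
          PySem.List.min? rest.keys (fun x => pvRankOf x)
        else
          PySem.List.max? rest.keys (fun x => rest.getD x 0)
      match most_convenient with
      | none => ""        -- Python: min/max of an empty dict raises ValueError; excluded by Pre_
      | some mc =>
        pvTypeA (PySem.List.sorted ((rest.modify mc 0 (· + j)).values) (fun v => v))
          ++ String.ofList (hand.toList.map pvRankOf)   -- ''.join([cards2rank[card] for card in hand])
  else if card2count.getD 'J' 0 = 5 then "Ammmmm"
  else
    pvTypeA (PySem.List.sorted card2count.values (fun v => v))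
      ++ String.ofList (hand.toList.map pvRankOf)

-- ===== PORT B =====

-- letters[cards.index(c)]; an unknown card is a Python ValueError, excluded by Pre_ ('?' here)
def pvLetterOf (c : Char) : Char :=
  ((PySem.List.index? "AKQJT98765432".toList c).bind
    (fun i => PySem.List.pyGet? "abcmdefghijkl".toList (i : Int))).getD '?'

-- sum(rest[i+1:].count(rest[i]) for i in range(len(rest))): for each position,
-- the number of equal later cards
def pvPairs : List Char → Int
  | [] => 0
  | c :: t => ((t.count c : Nat) : Int) + pvPairs t

-- {10:'A', 6:'B', 4:'C', 3:'D', 2:'E', 1:'F'}.get(p, 'G') if len == 5 else 'G'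
def pvTypP (lenHand : Int) (p : Int) : String :=
  if lenHand = 5 then
    if p = 10 then "A" else if p = 6 then "B" else if p = 4 then "C"
    else if p = 3 then "D" else if p = 2 then "E" else if p = 1 then "F" else "G"
  else "G"

def hash_hand2_alt (hand : String) : String :=
  let suffix := String.ofList (hand.toList.map pvLetterOf)
  let j : Int := ((hand.toList.count 'J' : Nat) : Int)
  if 1 ≤ j ∧ j ≤ 4 then
    let rest := hand.toList.filter (fun c => !(c == 'J'))
    match PySem.List.max? (rest.map (fun c => ((rest.count c : Nat) : Int))) (fun v => v) with
    | none => ""   -- Python: max() of an empty sequence raises ValueError; excluded by Pre_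
    | some m =>
      pvTypP (PySem.Str.len hand)
        (pvPairs rest + j * m + PySem.Int.floordiv (j * (j - 1)) 2) ++ suffix
  else
    pvTypP (PySem.Str.len hand) (pvPairs hand.toList) ++ suffix

-- ===== PRECONDITION & SPEC =====

def pvCards : List Char := ['A','K','Q','J','T','9','8','7','6','5','4','3','2']

-- Pre_ excludes (i) hands with a character outside the 13-card alphabet (A raises KeyError,
-- except via its five-joker early return, where B still raises ValueError) and (ii) hands of
-- 1–4 cards that are all jokers (A raises ValueError: min/max of an empty counter; so does B).
def Pre_hash_hand2 (hand : String) : Prop :=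
  (hand.toList.all pvCards.contains) = true ∧
  ¬(1 ≤ hand.toList.count 'J' ∧ hand.toList.count 'J' ≤ 4 ∧
      hand.toList.count 'J' = hand.toList.length)
instance (hand : String) : Decidable (Pre_hash_hand2 hand) := by
  unfold Pre_hash_hand2; infer_instance

def pvWitness_hash_hand2 : String := "AAKJ4"

-- On hands over the 13-card alphabet with exactly five 'J' cards plus at least one other card, A's
-- early return yields 'Ammmmm', discarding the extra cards and the whole rank suffix; B classifies
-- the hand normally (e.g. 'Gmmmmma' for 'JJJJJA'), keeping the promised 1 + len(hand) letter
-- format, which is what the function intends.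
def D_hash_hand2 (hand : String) : Prop :=
  hand.toList.count 'J' = 5 ∧ 5 < hand.toList.length
instance (hand : String) : Decidable (D_hash_hand2 hand) := by
  unfold D_hash_hand2; infer_instance

def Spec_hash_hand2 (hand : String) (out : String) : Prop :=
  ¬ D_hash_hand2 hand → out = hash_hand2_alt hand
instance (hand : String) (out : String) : Decidable (Spec_hash_hand2 hand out) := by
  unfold Spec_hash_hand2; infer_instance

def pvDiffWitness_hash_hand2 : String := "JJJJJA"
def pvDiffWitnessOut_hash_hand2 : String × String := ("Ammmmm", "Gmmmmma")

-- ===== CLAIM (what is proved, stated in full; the proofs are below) =====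
def Claim_unchanged_hash_hand2 : Prop := ∀ (hand : String), Dom_hash_hand2 hand →
  Pre_hash_hand2 hand → Spec_hash_hand2 hand (hash_hand2 hand)
def Claim_changed_hash_hand2 : Prop :=
  Dom_hash_hand2 (pvDiffWitness_hash_hand2) ∧ Pre_hash_hand2 (pvDiffWitness_hash_hand2) ∧
  D_hash_hand2 (pvDiffWitness_hash_hand2) ∧
  hash_hand2 (pvDiffWitness_hash_hand2) = pvDiffWitnessOut_hash_hand2.1 ∧
  hash_hand2_alt (pvDiffWitness_hash_hand2) = pvDiffWitnessOut_hash_hand2.2 ∧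
  pvDiffWitnessOut_hash_hand2.1 ≠ pvDiffWitnessOut_hash_hand2.2
def Claim_exact_hash_hand2 : Prop := ∀ (hand : String), Dom_hash_hand2 hand →
  Pre_hash_hand2 hand → D_hash_hand2 hand → hash_hand2 hand ≠ hash_hand2_alt hand

-- ===== LEMMAS AND PROOFS =====

-- the two card→letter maps agree on the 13-card alphabet
lemma pv_letter_rank (c : Char) (hc : pvCards.contains c = true) : pvLetterOf c = pvRankOf c := by
  simp only [pvCards, List.contains_eq_mem, List.mem_cons, decide_eq_true_eq] at hc
  rcases hc with rfl|rfl|rfl|rfl|rfl|rfl|rfl|rfl|rfl|rfl|rfl|rfl|rfl|h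
  all_goals first | rfl | decide | exact absurd h (List.not_mem_nil)

-- sum, over the distinct elements of l that satisfy p, of their multiplicities in l
lemma pv_sum_counts (l : List Char) (p : Char → Bool) :
    ((((PySem.Set.ofList l).filter p).map (fun k => ((l.count k : Nat) : Int))).sum)
      = ((l.countP p : Nat) : Int) := by
  have hnd : ((PySem.Set.ofList l).filter p).Nodup := (PySem.Set.nodup_ofList l).filter _
  have h1 := List.sum_toFinset (fun k => ((l.count k : Nat) : Int)) hnd
  rw [← h1]
  have h2 : ((PySem.Set.ofList l).filter p).toFinset = (l.filter p).toFinset := by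
    ext a
    simp [PySem.Set.mem_ofList]
  rw [h2, List.toFinset_filter]
  have h3 : ∑ a ∈ l.toFinset.filter (fun a => p a = true), ((l.count a : Nat) : Int)
      = ((∑ a ∈ l.toFinset.filter (fun a => p a = true), l.count a : Nat) : Int) := by
    push_cast; rfl
  rw [h3]
  congr 1
  rw [← List.toFinset_filter]
  calc ∑ a ∈ (l.filter p).toFinset, l.count a
      = ∑ a ∈ (l.filter p).toFinset, (l.filter p).count a := by
        apply Finset.sum_congr rfl
        intro a ha
        rw [List.mem_toFinset, List.mem_filter] at ha
        rw [List.count_filter ha.2]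
    _ = (l.filter p).length := List.sum_toFinset_count_eq_length _
    _ = l.countP p := List.countP_eq_length_filter.symm

-- replacing the value at one element of a nodup list changes the mapped sum by the difference
lemma pv_sum_update (K : List Char) (f g : Char → Int) (best : Char)
    (hnd : K.Nodup) (hb : best ∈ K) :
    (K.map (fun k => if k = best then g k else f k)).sum = (K.map f).sum + (g best - f best) := by
  induction K with
  | nil => simp at hb
  | cons a K ih =>
    rcases List.mem_cons.mp hb with h | h
    · subst h
      have hnb : best ∉ K := (List.nodup_cons.mp hnd).1
      have hmap : K.map (fun k => if k = best then g k else f k) = K.map f := by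
        apply List.map_congr_left
        intro x hx
        rw [if_neg]
        intro he; exact hnb (he ▸ hx)
      simp only [List.map_cons, List.sum_cons]
      rw [hmap]
      simp
      ring
    · have hab : a ≠ best := by
        intro he; exact (List.nodup_cons.mp hnd).1 (he ▸ h)
      have hih := ih (List.nodup_cons.mp hnd).2 h
      simp only [List.map_cons, List.sum_cons, hih, if_neg hab]
      ring

-- the per-distinct-card sum of count·(count−1) is twice B's pair count
lemma pv_finset_pairs (l : List Char) :
    (∑ k ∈ l.toFinset, ((l.count k : Nat) : Int) * (((l.count k : Nat) : Int) - 1))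
      = 2 * pvPairs l := by
  induction l with
  | nil => simp [pvPairs]
  | cons c t ih =>
    rw [List.toFinset_cons]
    by_cases hc : c ∈ t
    · have hcf : c ∈ t.toFinset := List.mem_toFinset.mpr hc
      rw [Finset.insert_eq_self.mpr hcf]
      have hrest : ∑ k ∈ t.toFinset.erase c,
          (((c :: t).count k : Nat) : Int) * ((((c :: t).count k : Nat) : Int) - 1)
          = ∑ k ∈ t.toFinset.erase c,
            ((t.count k : Nat) : Int) * (((t.count k : Nat) : Int) - 1) := by
        apply Finset.sum_congr rfl
        intro k hk
        have hkc : k ≠ c := Finset.ne_of_mem_erase hk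
        simp [Ne.symm hkc]
      have hsplit := (Finset.add_sum_erase t.toFinset
        (fun k => (((c :: t).count k : Nat) : Int) * ((((c :: t).count k : Nat) : Int) - 1)) hcf).symm
      have hsplit' := (Finset.add_sum_erase t.toFinset
        (fun k => ((t.count k : Nat) : Int) * (((t.count k : Nat) : Int) - 1)) hcf).symm
      rw [hsplit, hrest]
      have hS : ((t.count c : Nat) : Int) * (((t.count c : Nat) : Int) - 1)
          + ∑ k ∈ t.toFinset.erase c,
              ((t.count k : Nat) : Int) * (((t.count k : Nat) : Int) - 1)
          = 2 * pvPairs t := by rw [← hsplit']; exact ih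
      have hcc : (((c :: t).count c : Nat) : Int) = ((t.count c : Nat) : Int) + 1 := by
        rw [List.count_cons_self]; push_cast; ring
      have hexp : (((c :: t).count c : Nat) : Int) * ((((c :: t).count c : Nat) : Int) - 1)
          = ((t.count c : Nat) : Int) * (((t.count c : Nat) : Int) - 1)
            + 2 * ((t.count c : Nat) : Int) := by rw [hcc]; ring
      have hpv : pvPairs (c :: t) = ((t.count c : Nat) : Int) + pvPairs t := rfl
      rw [hpv]
      linarith [hS, hexp]
    · have hcf : c ∉ t.toFinset := fun h => hc (List.mem_toFinset.mp h)
      rw [Finset.sum_insert hcf]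
      have hc0 : t.count c = 0 := List.count_eq_zero.mpr hc
      have hcc : ((c :: t).count c : Nat) = 1 := by
        rw [List.count_cons_self, hc0]
      have hrest : ∑ k ∈ t.toFinset,
          (((c :: t).count k : Nat) : Int) * ((((c :: t).count k : Nat) : Int) - 1)
          = ∑ k ∈ t.toFinset,
            ((t.count k : Nat) : Int) * (((t.count k : Nat) : Int) - 1) := by
        apply Finset.sum_congr rfl
        intro k hk
        have hkc : k ≠ c := fun he => hcf (he ▸ hk)
        simp [Ne.symm hkc]
      have hpv : pvPairs (c :: t) = ((t.count c : Nat) : Int) + pvPairs t := rfl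
      rw [hrest, hcc, ih, hpv, hc0]
      push_cast
      ring

-- a list of values ≥ 1 has sum at least its length
lemma pv_len_le_sum (ws : List Int) (hpos : ∀ v ∈ ws, 1 ≤ v) :
    (ws.length : Int) ≤ ws.sum := by
  induction ws with
  | nil => simp
  | cons a t ih =>
    have ha := hpos a (by simp)
    have ht := ih (fun v hv => hpos v (List.mem_cons_of_mem a hv))
    simp only [List.length_cons, List.sum_cons]
    push_cast
    omega

-- A's six-pattern chain yields "G" whenever the counts do not sum to 5
lemma pv_typeA_G (ws : List Int) (h : ws.sum ≠ 5) : pvTypeA ws = "G" := by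
  unfold pvTypeA
  split_ifs with h1 h2 h3 h4 h5 h6 <;> first | rfl | (exfalso; subst_vars; simp at h)

-- the heart: on a positive count list with sum L and pair count p (2p = Σ c(c−1)),
-- A's six-pattern chain equals B's pair-count classification
lemma pv_core_sorted (ws : List Int) (L p : Int)
    (hpair : ws.Pairwise (· ≤ ·)) (hpos : ∀ v ∈ ws, 1 ≤ v)
    (hsum : ws.sum = L) (hp : (ws.map (fun w => w * (w - 1))).sum = 2 * p) :
    pvTypeA ws = pvTypP L p := by
  by_cases hL : L = 5
  · subst hL
    match ws with
    | [] => simp at hsum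
    | [a] =>
      have hL : a = 5 := by simpa using hsum
      subst hL
      have hp10 : p = 10 := by simp at hp; omega
      subst hp10; decide
    | [a, b] =>
      have hab : a ≤ b := by simpa using hpair
      have ha : 1 ≤ a := hpos a (by simp)
      have hL : a + b = 5 := by simpa using hsum
      have hcase : (a = 1 ∧ b = 4) ∨ (a = 2 ∧ b = 3) := by omega
      rcases hcase with ⟨rfl, rfl⟩ | ⟨rfl, rfl⟩
      · have hp6 : p = 6 := by simp at hp; omega
        subst hp6; decide
      · have hp4 : p = 4 := by simp at hp; omega
        subst hp4; decide
    | [a, b, c] =>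
      have hord : a ≤ b ∧ b ≤ c := by constructor <;> simp_all [List.pairwise_cons]
      have ha : 1 ≤ a := hpos a (by simp)
      have hL : a + b + c = 5 := by simpa [add_assoc] using hsum
      have hcase : (a = 1 ∧ b = 1 ∧ c = 3) ∨ (a = 1 ∧ b = 2 ∧ c = 2) := by omega
      rcases hcase with ⟨rfl, rfl, rfl⟩ | ⟨rfl, rfl, rfl⟩
      · have hp3 : p = 3 := by simp at hp; omega
        subst hp3; decide
      · have hp2 : p = 2 := by simp at hp; omega
        subst hp2; decide
    | [a, b, c, d] =>
      have hord : a ≤ b ∧ b ≤ c ∧ c ≤ d := by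
        refine ⟨?_, ?_, ?_⟩ <;> simp_all [List.pairwise_cons]
      have ha : 1 ≤ a := hpos a (by simp)
      have hb : 1 ≤ b := hpos b (by simp)
      have hL : a + b + c + d = 5 := by simpa [add_assoc] using hsum
      have hcase : a = 1 ∧ b = 1 ∧ c = 1 ∧ d = 2 := by omega
      obtain ⟨rfl, rfl, rfl, rfl⟩ := hcase
      have hp1 : p = 1 := by simp at hp; omega
      subst hp1; decide
    | [a, b, c, d, e] =>
      have ha : 1 ≤ a := hpos a (by simp)
      have hb : 1 ≤ b := hpos b (by simp)
      have hc : 1 ≤ c := hpos c (by simp)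
      have hd : 1 ≤ d := hpos d (by simp)
      have he : 1 ≤ e := hpos e (by simp)
      have hL : a + b + c + d + e = 5 := by simpa [add_assoc] using hsum
      have hcase : a = 1 ∧ b = 1 ∧ c = 1 ∧ d = 1 ∧ e = 1 := by omega
      obtain ⟨rfl, rfl, rfl, rfl, rfl⟩ := hcase
      have hp0 : p = 0 := by simp at hp; omega
      subst hp0; decide
    | a :: b :: c :: d :: e :: f :: tl =>
      exfalso
      have := pv_len_le_sum (a :: b :: c :: d :: e :: f :: tl) hpos
      simp only [List.length_cons] at this
      rw [hsum] at this
      push_cast at this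
      omega
  · rw [pv_typeA_G ws (by omega)]
    unfold pvTypP
    rw [if_neg hL]

-- lift pv_core_sorted through PySem's sort
lemma pv_core (V : List Int) (L p : Int) (hpos : ∀ v ∈ V, 1 ≤ v) (hsum : V.sum = L)
    (hp : (V.map (fun w => w * (w - 1))).sum = 2 * p) :
    pvTypeA (PySem.List.sorted V (fun v => v)) = pvTypP L p := by
  have hperm : (PySem.List.sorted V (fun v => v)).Perm V := PySem.List.sorted_perm V _ false
  apply pv_core_sorted
  · exact PySem.List.sorted_pairwise V _
  · intro v hv; exact hpos v (hperm.mem_iff.mp hv)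
  · rw [hperm.sum_eq]; exact hsum
  · rw [(hperm.map _).sum_eq]; exact hp

-- modifying a dict whose items are Kl.map (k, f k) at a key mc ∈ Kl rewrites just that item
lemma pv_modify_items (Kl : List Char) (f : Char → Int) (mc : Char) (g : Int → Int)
    (hnd : Kl.Nodup) (hmc : mc ∈ Kl) :
    ((PySem.Dict.mk (Kl.map (fun k => (k, f k)))).modify mc 0 g).items
      = Kl.map (fun k => if k = mc then (k, g (f k)) else (k, f k)) := by
  set d : PySem.Dict Char Int := PySem.Dict.mk (Kl.map (fun k => (k, f k))) with hdd
  have hkeys : d.keys = Kl := by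
    simp [hdd, PySem.Dict.keys, List.map_map, Function.comp_def]
  have hndk : d.keys.Nodup := by rw [hkeys]; exact hnd
  have hgd : d.getD mc 0 = f mc :=
    PySem.Dict.getD_of_mem_items d (List.mem_map_of_mem hmc) hndk 0
  have hcon : d.contains mc = true := (PySem.Dict.contains_iff_mem_keys d mc).mpr
    (by rw [hkeys]; exact hmc)
  show ((d.insert mc (g (d.getD mc 0))).items) = _
  rw [hgd, PySem.Dict.items_insert_of_contains d _ hcon]
  have : d.items = Kl.map (fun k => (k, f k)) := rfl
  rw [this, List.map_map]
  apply List.map_congr_left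
  intro k hk
  by_cases hke : k = mc
  · subst hke
    simp
  · simp [Function.comp, hke]

-- counter values are the per-distinct-card multiplicities
lemma pv_values_counter (l : List Char) :
    (PySem.Dict.counter l).values
      = (PySem.Set.ofList l).map (fun k => ((l.count k : Nat) : Int)) := by
  simp [PySem.Dict.values, PySem.Dict.items_counter l, List.map_map, Function.comp_def]

lemma pv_items_erase (l : List Char) :
    ((PySem.Dict.counter l).erase 'J').items
      = ((PySem.Set.ofList l).filter (fun k => !(k == 'J'))).map
          (fun k => (k, ((l.count k : Nat) : Int))) := by
  show ((PySem.Dict.counter l).items.filter _) = _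
  rw [PySem.Dict.items_counter l, List.filter_map]
  rfl

-- a sum over a nodup list of distinct keys equals the same Finset sum
lemma pv_sum_to_finset (K : List Char) (f : Char → Int) (hnd : K.Nodup) :
    (K.map f).sum = ∑ k ∈ K.toFinset, f k := (List.sum_toFinset f hnd).symm

-- B's type prefix is always a single letter
lemma pv_typP_len (L p : Int) : (pvTypP L p).toList.length = 1 := by
  unfold pvTypP
  split_ifs <;> decide

-- ===== VERDICT (by name: the statement is the Claim_ definition above) =====
theorem hash_hand2_spec : Claim_unchanged_hash_hand2 := by
  intro hand _ hpre
  unfold Spec_hash_hand2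
  intro hnD
  unfold D_hash_hand2 at hnD
  obtain ⟨hval, hjok⟩ := hpre
  have hsuf : hand.toList.map pvRankOf = hand.toList.map pvLetterOf := by
    apply List.map_congr_left
    intro c hc
    exact (pv_letter_rank c (by
      have := List.all_eq_true.mp hval c hc
      simpa using this)).symm
  set cnt : Char → Int := fun k => ((hand.toList.count k : Nat) : Int) with hcnt_def
  by_cases h14 : 1 ≤ ((hand.toList.count 'J' : Nat) : Int) ∧ ((hand.toList.count 'J' : Nat) : Int) ≤ 4
  · -- 1 ≤ count J ≤ 4: the joker redistribution runs in both programs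
    have hcJpos : 1 ≤ hand.toList.count 'J' := by exact_mod_cast h14.1
    have hcJle : hand.toList.count 'J' ≤ 4 := by exact_mod_cast h14.2
    have hget : (PySem.Dict.counter hand.toList).get? 'J'
        = some ((hand.toList.count 'J' : Nat) : Int) := by
      rcases hg : (PySem.Dict.counter hand.toList).get? 'J' with _ | v
      · exfalso
        have hh := PySem.Dict.getD_counter hand.toList 'J'
        rw [PySem.Dict.getD_eq_get?_getD, hg] at hh
        simp at hh
        omega
      · have hh := PySem.Dict.getD_counter hand.toList 'J'
        rw [PySem.Dict.getD_eq_get?_getD, hg] at hh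
        simp at hh
        rw [hh]
    have hpop : (PySem.Dict.counter hand.toList).pop? 'J'
        = some (((hand.toList.count 'J' : Nat) : Int),
                (PySem.Dict.counter hand.toList).erase 'J') := by
      simp [PySem.Dict.pop?, hget]
    set J : Int := ((hand.toList.count 'J' : Nat) : Int) with hJ_def
    set Kf := (PySem.Set.ofList hand.toList).filter (fun k => !(k == 'J')) with hKf
    set rst := hand.toList.filter (fun c => !(c == 'J')) with hrst
    have hndKf : Kf.Nodup := (PySem.Set.nodup_ofList _).filter _
    have hmemKf : ∀ k, k ∈ Kf ↔ (k ∈ hand.toList ∧ k ≠ 'J') := by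
      intro k; simp [hKf, PySem.Set.mem_ofList]
    have hmemrst : ∀ k, k ∈ rst ↔ (k ∈ hand.toList ∧ k ≠ 'J') := by
      intro k; simp [hrst, List.mem_filter]
    have hfin : Kf.toFinset = rst.toFinset := by
      ext k
      simp only [List.mem_toFinset, hmemKf, hmemrst]
    have hcnt_rst : ∀ k : Char, k ≠ 'J' → ((rst.count k : Nat) : Int) = cnt k := by
      intro k hk
      rw [hrst, List.count_filter (by simpa using hk)]
    have hrestmk : (PySem.Dict.counter hand.toList).erase 'J'
        = PySem.Dict.mk (Kf.map (fun k => (k, cnt k))) := by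
      apply PySem.Dict.ext
      exact pv_items_erase hand.toList
    have hkeysrest : ((PySem.Dict.counter hand.toList).erase 'J').keys = Kf := by
      rw [hrestmk]; simp [PySem.Dict.keys, List.map_map, Function.comp_def]
    have hndkeys : ((PySem.Dict.counter hand.toList).erase 'J').keys.Nodup := by
      rw [hkeysrest]; exact hndKf
    have hgdKf : ∀ k ∈ Kf, ((PySem.Dict.counter hand.toList).erase 'J').getD k 0 = cnt k := by
      intro k hk
      conv_lhs => rw [hrestmk]
      rw [← hrestmk]
      exact PySem.Dict.getD_of_mem_items _
        (by rw [hrestmk]; exact List.mem_map_of_mem hk) hndkeys 0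
    have hKfne : Kf ≠ [] := by
      have hlt : hand.toList.count 'J' < hand.toList.length := by
        rcases Nat.lt_or_ge (hand.toList.count 'J') hand.toList.length with h | h
        · exact h
        · exact absurd ⟨hcJpos, hcJle, le_antisymm List.count_le_length h⟩ hjok
      obtain ⟨c, hc, hcne⟩ : ∃ c ∈ hand.toList, c ≠ 'J' := by
        by_contra hall
        simp only [not_exists, not_and, not_not, ne_eq] at hall
        have : hand.toList.count 'J' = hand.toList.length :=
          List.count_eq_length.mpr (fun b hb => (hall b hb).symm)
        omega
      intro hnil
      have : c ∈ Kf := (hmemKf c).mpr ⟨hc, hcne⟩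
      rw [hnil] at this
      simp at this
    have hrstne : rst ≠ [] := by
      obtain ⟨c, hc⟩ := List.exists_mem_of_ne_nil Kf hKfne
      intro hnil
      have : c ∈ rst := (hmemrst c).mpr ((hmemKf c).mp hc)
      rw [hnil] at this
      simp at this
    obtain ⟨m, hm⟩ : ∃ m, PySem.List.max?
        (rst.map (fun c => ((rst.count c : Nat) : Int))) (fun v => v) = some m := by
      rcases h : PySem.List.max? (rst.map (fun c => ((rst.count c : Nat) : Int)))
          (fun v => v) with _ | m
      · exfalso
        have := (PySem.List.max?_eq_none_iff _ _).mp h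
        exact hrstne (List.map_eq_nil_iff.mp this)
      · exact ⟨m, rfl⟩
    -- the sum of the bumped counts is the hand length, for ANY bumped key of Kf
    have hsumKf : (Kf.map cnt).sum = ((hand.toList.countP (fun k => !(k == 'J')) : Nat) : Int) :=
      pv_sum_counts hand.toList (fun k => !(k == 'J'))
    have hsum_any : ∀ mc ∈ Kf,
        ((((PySem.Dict.counter hand.toList).erase 'J').modify mc 0 (· + J)).values).sum
          = ((hand.toList.length : Nat) : Int) := by
      intro mc hmc
      have hvals' : (((PySem.Dict.counter hand.toList).erase 'J').modify mc 0 (· + J)).values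
          = Kf.map (fun k => if k = mc then cnt k + J else cnt k) := by
        rw [hrestmk]
        show List.map _ _ = _
        rw [pv_modify_items Kf cnt mc (· + J) hndKf hmc, List.map_map]
        apply List.map_congr_left
        intro k hk
        by_cases hke : k = mc <;> simp [hke]
      rw [hvals', pv_sum_update Kf cnt (fun k => cnt k + J) mc hndKf hmc, hsumKf]
      have h1 : hand.toList.countP (fun k => !(k == 'J')) + hand.toList.count 'J'
          = hand.toList.length := by
        have h2 := List.length_eq_length_filter_add (l := hand.toList) (fun k => (k == 'J'))
        have h3 : hand.toList.count 'J'
            = (hand.toList.filter (fun k => (k == 'J'))).length := by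
          rw [List.count_eq_countP, List.countP_eq_length_filter]
        rw [List.countP_eq_length_filter]
        omega
      simp only [hJ_def]
      omega
    have hpos_any : ∀ mc ∈ Kf, ∀ v ∈
        (((PySem.Dict.counter hand.toList).erase 'J').modify mc 0 (· + J)).values, 1 ≤ v := by
      intro mc hmc v hv
      have hvals' : (((PySem.Dict.counter hand.toList).erase 'J').modify mc 0 (· + J)).values
          = Kf.map (fun k => if k = mc then cnt k + J else cnt k) := by
        rw [hrestmk]
        show List.map _ _ = _
        rw [pv_modify_items Kf cnt mc (· + J) hndKf hmc, List.map_map]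
        apply List.map_congr_left
        intro k hk
        by_cases hke : k = mc <;> simp [hke]
      rw [hvals'] at hv
      obtain ⟨k, hk, rfl⟩ := List.mem_map.mp hv
      have hkl : k ∈ hand.toList := ((hmemKf k).mp hk).1
      have hkc : 0 < hand.toList.count k := List.count_pos_iff.mpr hkl
      simp only [hcnt_def]
      by_cases hke : k = mc <;> simp only [hke, if_true, if_false, hJ_def] <;> omega
    show hash_hand2 hand = hash_hand2_alt hand
    unfold hash_hand2 hash_hand2_alt
    simp only [PySem.Dict.getD_counter]
    rw [if_pos h14, if_pos h14]
    simp only [hpop, ← hrst, hm]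
    by_cases hlen5 : ((PySem.Dict.counter hand.toList).erase 'J').values.length = 5
    · -- five distinct non-joker cards: the hand has ≥ 6 cards, both sides say "G"
      rw [if_pos hlen5]
      have hKflen : Kf.length = 5 := by
        have : ((PySem.Dict.counter hand.toList).erase 'J').values.length = Kf.length := by
          rw [hrestmk]
          simp [PySem.Dict.values, List.map_map]
        omega
      have hlenbig : 6 ≤ hand.toList.length := by
        have hcard : rst.toFinset.card = 5 := by
          rw [← hfin, List.toFinset_card_of_nodup hndKf, hKflen]
        have hle : rst.toFinset.card ≤ rst.length := List.toFinset_card_le rst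
        have hrlen : rst.length = hand.toList.countP (fun k => !(k == 'J')) := by
          rw [hrst, List.countP_eq_length_filter]
        have h1 : hand.toList.countP (fun k => !(k == 'J')) + hand.toList.count 'J'
            = hand.toList.length := by
          have h2 := List.length_eq_length_filter_add (l := hand.toList) (fun k => (k == 'J'))
          have h3 : hand.toList.count 'J'
              = (hand.toList.filter (fun k => (k == 'J'))).length := by
            rw [List.count_eq_countP, List.countP_eq_length_filter]
          rw [List.countP_eq_length_filter]
          omega
        omega
      obtain ⟨mcA, hmcA⟩ : ∃ mcA, PySem.List.min?
          ((PySem.Dict.counter hand.toList).erase 'J').keys (fun x => pvRankOf x) = some mcA := by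
        rcases h : PySem.List.min? ((PySem.Dict.counter hand.toList).erase 'J').keys
            (fun x => pvRankOf x) with _ | mcA
        · exfalso
          have := (PySem.List.min?_eq_none_iff _ _).mp h
          rw [hkeysrest] at this
          exact hKfne this
        · exact ⟨mcA, rfl⟩
      simp only [hmcA]
      have hmcAKf : mcA ∈ Kf := by rw [← hkeysrest]; exact PySem.List.min?_mem hmcA
      have hA_G : pvTypeA (PySem.List.sorted
          ((((PySem.Dict.counter hand.toList).erase 'J').modify mcA 0 (· + J)).values)
          (fun v => v)) = "G" := by
        apply pv_typeA_G
        rw [(PySem.List.sorted_perm _ _ false).sum_eq, hsum_any mcA hmcAKf]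
        omega
      have hB_G : pvTypP (PySem.Str.len hand)
          (pvPairs rst + J * m + PySem.Int.floordiv (J * (J - 1)) 2) = "G" := by
        unfold pvTypP
        rw [if_neg]
        rw [PySem.Str.len_eq]
        omega
      rw [hA_G, hB_G, hsuf]
    · -- at most four groups: A bumps its most frequent card, whose count is B's max m
      rw [if_neg hlen5]
      obtain ⟨best, hbest⟩ : ∃ best, PySem.List.max?
          ((PySem.Dict.counter hand.toList).erase 'J').keys
          (fun x => ((PySem.Dict.counter hand.toList).erase 'J').getD x 0) = some best := by
        rcases h : PySem.List.max? ((PySem.Dict.counter hand.toList).erase 'J').keys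
            (fun x => ((PySem.Dict.counter hand.toList).erase 'J').getD x 0) with _ | best
        · exfalso
          have := (PySem.List.max?_eq_none_iff _ _).mp h
          rw [hkeysrest] at this
          exact hKfne this
        · exact ⟨best, rfl⟩
      simp only [hbest]
      have hbestKf : best ∈ Kf := by rw [← hkeysrest]; exact PySem.List.max?_mem hbest
      have hbestrst : best ∈ rst := (hmemrst best).mpr ((hmemKf best).mp hbestKf)
      -- B's maximum frequency m equals the count of A's chosen card
      have hmeq : m = cnt best := by
        have hle1 : cnt best ≤ m := by
          have hmem : ((rst.count best : Nat) : Int)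
              ∈ rst.map (fun c => ((rst.count c : Nat) : Int)) := List.mem_map_of_mem hbestrst
          have := PySem.List.max?_isMax hm _ hmem
          rw [hcnt_rst best ((hmemKf best).mp hbestKf).2] at this
          exact this
        have hle2 : m ≤ cnt best := by
          obtain ⟨c0, hc0, hc0m⟩ := List.mem_map.mp (PySem.List.max?_mem hm)
          have hc0Kf : c0 ∈ Kf := (hmemKf c0).mpr ((hmemrst c0).mp hc0)
          have := PySem.List.max?_isMax hbest c0 (by rw [hkeysrest]; exact hc0Kf)
          rw [hgdKf c0 hc0Kf, hgdKf best hbestKf] at this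
          rw [← hc0m, hcnt_rst c0 ((hmemrst c0).mp hc0).2]
          exact this
        omega
      have hvals' : (((PySem.Dict.counter hand.toList).erase 'J').modify best 0 (· + J)).values
          = Kf.map (fun k => if k = best then cnt k + J else cnt k) := by
        rw [hrestmk]
        show List.map _ _ = _
        rw [pv_modify_items Kf cnt best (· + J) hndKf hbestKf, List.map_map]
        apply List.map_congr_left
        intro k hk
        by_cases hke : k = best <;> simp [hke]
      -- the pair-count identity: Σ c(c−1) over the bumped counts is twice B's p
      have hfd : 2 * PySem.Int.floordiv (J * (J - 1)) 2 = J * (J - 1) := by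
        have hJr : J = 1 ∨ J = 2 ∨ J = 3 ∨ J = 4 := by omega
        rcases hJr with h | h | h | h <;> rw [h] <;> decide
      have hsq : ((((PySem.Dict.counter hand.toList).erase 'J').modify best 0
            (· + J)).values.map (fun w => w * (w - 1))).sum
          = 2 * (pvPairs rst + J * m + PySem.Int.floordiv (J * (J - 1)) 2) := by
        rw [hvals', List.map_map]
        have hmap : (Kf.map ((fun w => w * (w - 1)) ∘ fun k => if k = best then cnt k + J else cnt k))
            = Kf.map (fun k => if k = best then (cnt k + J) * (cnt k + J - 1)
                else cnt k * (cnt k - 1)) := by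
          apply List.map_congr_left
          intro k hk
          by_cases hke : k = best <;> simp [Function.comp, hke]
        rw [hmap, pv_sum_update Kf (fun k => cnt k * (cnt k - 1))
          (fun k => (cnt k + J) * (cnt k + J - 1)) best hndKf hbestKf]
        have hpairsum : (Kf.map (fun k => cnt k * (cnt k - 1))).sum = 2 * pvPairs rst := by
          rw [pv_sum_to_finset Kf _ hndKf]
          rw [show (∑ k ∈ Kf.toFinset, cnt k * (cnt k - 1))
              = ∑ k ∈ rst.toFinset, ((rst.count k : Nat) : Int) * (((rst.count k : Nat) : Int) - 1) from ?_]
          · exact pv_finset_pairs rst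
          · rw [hfin]
            apply Finset.sum_congr rfl
            intro k hk
            have hkJ : k ≠ 'J' := ((hmemrst k).mp (List.mem_toFinset.mp hk)).2
            rw [hcnt_rst k hkJ]
        rw [hpairsum, hmeq]
        have hexp : (cnt best + J) * (cnt best + J - 1) - cnt best * (cnt best - 1)
            = 2 * J * cnt best + J * (J - 1) := by ring
        linarith [hexp, hfd]
      rw [pv_core _ ((hand.toList.length : Nat) : Int) _
        (hpos_any best hbestKf) (hsum_any best hbestKf) hsq, hsuf, PySem.Str.len_eq]
  · by_cases h5 : ((hand.toList.count 'J' : Nat) : Int) = 5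
    · -- exactly five jokers: with ¬D_ the hand IS "JJJJJ"
      have hc5 : hand.toList.count 'J' = 5 := by exact_mod_cast h5
      have hle : hand.toList.count 'J' ≤ hand.toList.length := List.count_le_length
      have hnlt : ¬(5 < hand.toList.length) := fun hlt => hnD ⟨hc5, hlt⟩
      have hrep : hand.toList = List.replicate 5 'J' := by
        rw [List.eq_replicate_iff]
        refine ⟨by omega, ?_⟩
        intro b hb
        exact (List.count_eq_length.mp (by omega) b hb).symm
      have hhand : hand = "JJJJJ" := String.toList_inj.mp (by rw [hrep]; rfl)
      rw [hhand]
      decide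
    · -- no jokers (or six and more): both classify the raw hand
      have hvals := pv_values_counter hand.toList
      have hpos : ∀ v ∈ (PySem.Dict.counter hand.toList).values, 1 ≤ v := by
        rw [hvals]
        intro v hv
        obtain ⟨k, hk, rfl⟩ := List.mem_map.mp hv
        have : k ∈ hand.toList := (PySem.Set.mem_ofList _ _).mp hk
        have : 0 < hand.toList.count k := List.count_pos_iff.mpr this
        exact_mod_cast this
      have hsum : (PySem.Dict.counter hand.toList).values.sum
          = ((hand.toList.length : Nat) : Int) := by
        rw [hvals, ← List.filter_true (PySem.Set.ofList hand.toList)]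
        rw [pv_sum_counts hand.toList (fun _ => true)]
        congr 1
        exact List.countP_eq_length.mpr (fun _ _ => rfl)
      have hsq : ((PySem.Dict.counter hand.toList).values.map (fun w => w * (w - 1))).sum
          = 2 * pvPairs hand.toList := by
        rw [hvals, List.map_map]
        rw [pv_sum_to_finset _ _ (PySem.Set.nodup_ofList _)]
        rw [show ((PySem.Set.ofList hand.toList).toFinset) = hand.toList.toFinset from ?_]
        · exact pv_finset_pairs hand.toList
        · ext k
          simp [PySem.Set.mem_ofList]
      show hash_hand2 hand = hash_hand2_alt hand
      unfold hash_hand2 hash_hand2_alt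
      simp only [PySem.Dict.getD_counter]
      rw [if_neg h14, if_neg h5, if_neg h14]
      rw [pv_core _ ((hand.toList.length : Nat) : Int) _ hpos hsum hsq, hsuf, PySem.Str.len_eq]

set_option maxRecDepth 100000 in
theorem hash_hand2_changed : Claim_changed_hash_hand2 := by
  unfold Claim_changed_hash_hand2
  refine ⟨by decide, by decide, by decide, by decide, by decide, by decide⟩

theorem hash_hand2_tight : Claim_exact_hash_hand2 := by
  intro hand _ _ hD
  unfold D_hash_hand2 at hD
  obtain ⟨hc5, hlen⟩ := hD
  have hA : hash_hand2 hand = "Ammmmm" := by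
    unfold hash_hand2
    simp only [PySem.Dict.getD_counter, hc5]
    rw [if_neg (by norm_num), if_pos (by norm_num)]
  have hBlen : (hash_hand2_alt hand).toList.length = 1 + hand.toList.length := by
    unfold hash_hand2_alt
    rw [if_neg (by rw [hc5]; norm_num)]
    rw [String.toList_append, List.length_append, String.toList_ofList, List.length_map,
      pv_typP_len]
  intro heq
  rw [heq] at hA
  have h6 := congrArg (fun s : String => s.toList.length) hA
  simp only [hBlen] at h6
  have : ("Ammmmm" : String).toList.length = 6 := by decide
  omega
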